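-- pv_equiv track=rewrite | github.com/sphill98/Algorithm | BJ/bj2630.py | paperCut
-- ===== SOURCE A (Python) =====
-- def paperCut(p): #재귀함수
--   s = 0
--   for i in p:
--     s += sum(i)
--   if s == 0:
--     return 'w'
--   elif s == (len(p) ** 2):
--     return 'b'
--   else: #색종이를 4개로 나누어 분할정복한다.
--     p1, p2, p3, p4 = [], [], [], []
--     for i in range(len(p) // 2):
--       p1.append(p[i][:(len(p)//2)])
--       p2.append(p[i][(len(p)//2):])
--       p3.append(p[i+(len(p)//2)][:(len(p)//2)])
--       p4.append(p[i+(len(p)//2)][(len(p)//2):])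
--     return paperCut(p1) + paperCut(p2) + paperCut(p3) + paperCut(p4) #스트링으로 이어줌.
-- ===== SOURCE B (Python) =====
-- def paperCut(p):
--     # Iterative quadtree traversal: an explicit LIFO stack of sub-papers and a
--     # joined output list instead of recursion with string concatenation.
--     out = []
--     stack = [p]
--     while stack:
--         q = stack.pop()
--         n = len(q)
--         s = sum(map(sum, q))
--         if s == 0:
--             out.append('w')
--         elif s == n * n:
--             out.append('b')
--         else:
--             h = n // 2
--             top, mid = q[:h], q[h:h + h]
--             stack.append([r[h:] for r in mid])
--             stack.append([r[:h] for r in mid])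
--             stack.append([r[h:] for r in top])
--             stack.append([r[:h] for r in top])
--     return ''.join(out)
-- ===== Notes on version B (the rewrite author's own statement) =====
-- stated objective: alternative
-- what changed: Replaces A's recursion (four recursive calls whose result strings are concatenated at every level) with an iterative worklist: an explicit LIFO stack of sub-papers, quadrants built by list comprehensions over row slices, and the answer assembled once by joining an output list.
import Mathlib
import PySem

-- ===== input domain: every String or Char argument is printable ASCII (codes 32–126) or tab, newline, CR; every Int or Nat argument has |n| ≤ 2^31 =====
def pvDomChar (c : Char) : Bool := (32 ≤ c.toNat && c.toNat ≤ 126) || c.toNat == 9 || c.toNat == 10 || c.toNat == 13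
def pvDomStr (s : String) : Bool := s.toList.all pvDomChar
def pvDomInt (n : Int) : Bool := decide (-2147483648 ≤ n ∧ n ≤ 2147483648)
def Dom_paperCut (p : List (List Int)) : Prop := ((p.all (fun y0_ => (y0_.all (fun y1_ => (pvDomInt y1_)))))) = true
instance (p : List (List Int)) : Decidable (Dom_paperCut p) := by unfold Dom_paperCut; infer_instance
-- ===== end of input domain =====

-- B replaces A's recursion (which concatenates four recursive strings) by an explicit
-- LIFO stack of sub-papers with a joined output list: alternative decomposition, same results.

-- ===== PORT A =====
-- A's `s = 0; for i in p: s += sum(i)` accumulator loop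
def pvSumA (p : List (List Int)) : Int := p.foldl (fun s i => s + i.sum) 0

-- A's quadrant loop: `for i in range(len(p)//2): p1.append(p[i][:h]); …` folding over
-- the four accumulator lists; p[i] / p[i+h] are provably in range, ported via getD.
def pvQuadStep (p : List (List Int)) (h : Nat)
    (q : List (List Int) × List (List Int) × List (List Int) × List (List Int)) (i : Nat) :
    List (List Int) × List (List Int) × List (List Int) × List (List Int) :=
  (q.1 ++ [PySem.List.slice (p.getD i []) none (some (h : Int))],
   q.2.1 ++ [PySem.List.slice (p.getD i []) (some (h : Int)) none],
   q.2.2.1 ++ [PySem.List.slice (p.getD (i + h) []) none (some (h : Int))],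
   q.2.2.2 ++ [PySem.List.slice (p.getD (i + h) []) (some (h : Int)) none])

def pvQuads (p : List (List Int)) (h : Nat) :
    List (List Int) × List (List Int) × List (List Int) × List (List Int) :=
  (List.range h).foldl (pvQuadStep p h) ([], [], [], [])

-- termination helpers for paperCut (cited in decreasing_by; one lemma per quadrant,
-- each foldl step appends one element)
theorem pvQuads_foldl_len1 (p : List (List Int)) (h : Nat) (l : List Nat) :
    ∀ q : List (List Int) × List (List Int) × List (List Int) × List (List Int),
    (l.foldl (pvQuadStep p h) q).1.length = q.1.length + l.length := by
  induction l with
  | nil => exact fun q => (Nat.add_zero _).symm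
  | cons x xs ih =>
    intro q
    rw [List.foldl_cons, ih (pvQuadStep p h q x), List.length_cons]
    rw [show (pvQuadStep p h q x).1.length = q.1.length + 1 from List.length_append]
    omega

theorem pvQuads_foldl_len2 (p : List (List Int)) (h : Nat) (l : List Nat) :
    ∀ q : List (List Int) × List (List Int) × List (List Int) × List (List Int),
    (l.foldl (pvQuadStep p h) q).2.1.length = q.2.1.length + l.length := by
  induction l with
  | nil => exact fun q => (Nat.add_zero _).symm
  | cons x xs ih =>
    intro q
    rw [List.foldl_cons, ih (pvQuadStep p h q x), List.length_cons]
    rw [show (pvQuadStep p h q x).2.1.length = q.2.1.length + 1 from List.length_append]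
    omega

theorem pvQuads_foldl_len3 (p : List (List Int)) (h : Nat) (l : List Nat) :
    ∀ q : List (List Int) × List (List Int) × List (List Int) × List (List Int),
    (l.foldl (pvQuadStep p h) q).2.2.1.length = q.2.2.1.length + l.length := by
  induction l with
  | nil => exact fun q => (Nat.add_zero _).symm
  | cons x xs ih =>
    intro q
    rw [List.foldl_cons, ih (pvQuadStep p h q x), List.length_cons]
    rw [show (pvQuadStep p h q x).2.2.1.length = q.2.2.1.length + 1 from List.length_append]
    omega

theorem pvQuads_foldl_len4 (p : List (List Int)) (h : Nat) (l : List Nat) :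
    ∀ q : List (List Int) × List (List Int) × List (List Int) × List (List Int),
    (l.foldl (pvQuadStep p h) q).2.2.2.length = q.2.2.2.length + l.length := by
  induction l with
  | nil => exact fun q => (Nat.add_zero _).symm
  | cons x xs ih =>
    intro q
    rw [List.foldl_cons, ih (pvQuadStep p h q x), List.length_cons]
    rw [show (pvQuadStep p h q x).2.2.2.length = q.2.2.2.length + 1 from List.length_append]
    omega

theorem pvQuads_len1 (p : List (List Int)) (h : Nat) : (pvQuads p h).1.length = h := by
  rw [pvQuads, pvQuads_foldl_len1 p h (List.range h) ([], [], [], [])]; simp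

theorem pvQuads_len2 (p : List (List Int)) (h : Nat) : (pvQuads p h).2.1.length = h := by
  rw [pvQuads, pvQuads_foldl_len2 p h (List.range h) ([], [], [], [])]; simp

theorem pvQuads_len3 (p : List (List Int)) (h : Nat) : (pvQuads p h).2.2.1.length = h := by
  rw [pvQuads, pvQuads_foldl_len3 p h (List.range h) ([], [], [], [])]; simp

theorem pvQuads_len4 (p : List (List Int)) (h : Nat) : (pvQuads p h).2.2.2.length = h := by
  rw [pvQuads, pvQuads_foldl_len4 p h (List.range h) ([], [], [], [])]; simp

theorem pvSumA_ne_zero_pos (p : List (List Int)) (hs : pvSumA p ≠ 0) : 0 < p.length := by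
  cases p with
  | nil => exact absurd rfl hs
  | cons x xs => exact Nat.succ_pos _

def paperCut (p : List (List Int)) : String :=
  if hs : pvSumA p = 0 then "w"
  else if pvSumA p = (p.length : Int) ^ 2 then "b"
  else
    paperCut (pvQuads p (p.length / 2)).1 ++ paperCut (pvQuads p (p.length / 2)).2.1 ++
    paperCut (pvQuads p (p.length / 2)).2.2.1 ++ paperCut (pvQuads p (p.length / 2)).2.2.2
termination_by p.length
decreasing_by
  · rw [pvQuads_len1]; exact Nat.div_lt_self (pvSumA_ne_zero_pos p hs) Nat.one_lt_two
  · rw [pvQuads_len2]; exact Nat.div_lt_self (pvSumA_ne_zero_pos p hs) Nat.one_lt_two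
  · rw [pvQuads_len3]; exact Nat.div_lt_self (pvSumA_ne_zero_pos p hs) Nat.one_lt_two
  · rw [pvQuads_len4]; exact Nat.div_lt_self (pvSumA_ne_zero_pos p hs) Nat.one_lt_two

-- ===== PORT B =====
-- B's `while stack:` loop: measure = Σ 5^len over the stacked sub-papers
def pvMeas (st : List (List (List Int))) : Nat := (st.map (fun q => 5 ^ q.length)).sum

-- termination helpers for pvGoB (cited in decreasing_by)
theorem pvMeas_cons (q : List (List Int)) (st : List (List (List Int))) :
    pvMeas (q :: st) = 5 ^ q.length + pvMeas st := by
  simp [pvMeas]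

theorem pvSumMap_ne_zero_pos (q : List (List Int)) (hs : (q.map List.sum).sum ≠ 0) :
    0 < q.length := by
  cases q with
  | nil => exact absurd rfl hs
  | cons x xs => exact Nat.succ_pos _

theorem pvSliceLen_le (q : List (List Int)) (h : Nat) :
    (PySem.List.slice q none (some (h : Int))).length ≤ h ∧
    (PySem.List.slice q (some (h : Int)) (some ((h : Int) + (h : Int)))).length ≤ h := by
  rw [PySem.List.slice_to_natCast, PySem.List.slice_natCast_add]
  constructor
  · simp
  · simp

-- B's stack loop: pop the head, classify or push the four quadrants (top-left first)
def pvGoB (stack : List (List (List Int))) (out : List String) : String :=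
  match stack with
  | [] => String.join out
  | q :: rest =>
    if hs : (q.map List.sum).sum = 0 then pvGoB rest (out ++ ["w"])
    else if (q.map List.sum).sum = (q.length : Int) * (q.length : Int) then
      pvGoB rest (out ++ ["b"])
    else
      pvGoB ((PySem.List.slice q none (some ((q.length / 2 : Nat) : Int))).map
               (fun r => PySem.List.slice r none (some ((q.length / 2 : Nat) : Int))) ::
             (PySem.List.slice q none (some ((q.length / 2 : Nat) : Int))).map
               (fun r => PySem.List.slice r (some ((q.length / 2 : Nat) : Int)) none) ::
             (PySem.List.slice q (some ((q.length / 2 : Nat) : Int))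
                 (some (((q.length / 2 : Nat) : Int) + ((q.length / 2 : Nat) : Int)))).map
               (fun r => PySem.List.slice r none (some ((q.length / 2 : Nat) : Int))) ::
             (PySem.List.slice q (some ((q.length / 2 : Nat) : Int))
                 (some (((q.length / 2 : Nat) : Int) + ((q.length / 2 : Nat) : Int)))).map
               (fun r => PySem.List.slice r (some ((q.length / 2 : Nat) : Int)) none) :: rest) out
termination_by pvMeas stack
decreasing_by
  · rw [pvMeas_cons]
    have : 0 < 5 ^ q.length := Nat.pow_pos (by omega : (0:Nat) < 5)
    omega
  · rw [pvMeas_cons]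
    have : 0 < 5 ^ q.length := Nat.pow_pos (by omega : (0:Nat) < 5)
    omega
  · have hn : 0 < q.length := pvSumMap_ne_zero_pos q hs
    have hsl := pvSliceLen_le q (q.length / 2)
    rw [pvMeas_cons, pvMeas_cons, pvMeas_cons, pvMeas_cons, pvMeas_cons]
    simp only [List.length_map]
    have hh : q.length / 2 ≤ q.length - 1 := by omega
    have hb : ∀ m, m ≤ q.length / 2 → 5 ^ m ≤ 5 ^ (q.length - 1) := fun m hm =>
      Nat.pow_le_pow_right (by omega) (le_trans hm hh)
    have h1 := hb _ hsl.1
    have h2 := hb _ hsl.2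
    have h5 : 4 * 5 ^ (q.length - 1) < 5 ^ q.length := by
      have he : 5 ^ q.length = 5 * 5 ^ (q.length - 1) := by
        rw [← pow_succ']
        congr 1
        omega
      have : 0 < 5 ^ (q.length - 1) := Nat.pow_pos (by omega : (0:Nat) < 5)
      omega
    omega

def paperCut_alt (p : List (List Int)) : String := pvGoB [p] []

-- ===== PRECONDITION & SPEC =====
def Spec_paperCut (p : List (List Int)) (out : String) : Prop := out = paperCut_alt p
instance (p : List (List Int)) (out : String) : Decidable (Spec_paperCut p out) := by unfold Spec_paperCut; infer_instance

-- ===== CLAIM (what is proved, stated in full; the proofs are below) =====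
def Claim_equal_paperCut : Prop := ∀ (p : List (List Int)), Dom_paperCut p → Spec_paperCut p (paperCut p)

-- ===== LEMMAS AND PROOFS =====

theorem pvFoldlAdd {α : Type} (g : α → Int) (l : List α) (c : Int) :
    l.foldl (fun s x => s + g x) c = c + (l.map g).sum := by
  induction l generalizing c with
  | nil => simp
  | cons x xs ih => simp [ih]; ring

theorem pvSumA_eq (q : List (List Int)) : pvSumA q = (q.map List.sum).sum := by
  unfold pvSumA
  rw [pvFoldlAdd]
  simp

-- A's quadrant foldl in closed form
theorem pvQuads_aux (p : List (List Int)) (h : Nat) (l : List Nat) :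
    ∀ (q : List (List Int) × List (List Int) × List (List Int) × List (List Int)),
    l.foldl (pvQuadStep p h) q =
      (q.1 ++ l.map (fun i => (p.getD i []).take h),
       q.2.1 ++ l.map (fun i => (p.getD i []).drop h),
       q.2.2.1 ++ l.map (fun i => (p.getD (i + h) []).take h),
       q.2.2.2 ++ l.map (fun i => (p.getD (i + h) []).drop h)) := by
  induction l with
  | nil => intro q; simp
  | cons x xs ih =>
    intro q
    simp only [List.foldl_cons, ih, List.map_cons]
    simp [pvQuadStep, List.append_assoc]

theorem pvQuads_eq (p : List (List Int)) (h : Nat) :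
    pvQuads p h =
      ((List.range h).map (fun i => (p.getD i []).take h),
       (List.range h).map (fun i => (p.getD i []).drop h),
       (List.range h).map (fun i => (p.getD (i + h) []).take h),
       (List.range h).map (fun i => (p.getD (i + h) []).drop h)) := by
  unfold pvQuads
  rw [pvQuads_aux]
  simp

-- index maps over range become maps over take/drop of the list itself
theorem pvRangeMapGetD {β : Type} (q : List (List Int)) (h : Nat) (hh : h ≤ q.length)
    (f : List Int → β) :
    (List.range h).map (fun i => f (q.getD i [])) = (q.take h).map f := by
  apply List.ext_getElem
  · simp [min_eq_left hh]
  · intro i h1 h2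
    simp only [List.length_map, List.length_range] at h1
    simp [List.getD_eq_getElem?_getD, List.getElem?_eq_getElem (lt_of_lt_of_le h1 hh)]

theorem pvRangeMapGetD' {β : Type} (q : List (List Int)) (h : Nat) (hh : h + h ≤ q.length)
    (f : List Int → β) :
    (List.range h).map (fun i => f (q.getD (i + h) [])) = (((q.drop h).take h).map f) := by
  apply List.ext_getElem
  · simp only [List.length_map, List.length_range, List.length_take, List.length_drop]
    omega
  · intro i h1 h2
    simp only [List.length_map, List.length_range] at h1
    simp [List.getD_eq_getElem?_getD, List.getElem?_eq_getElem (show h + i < q.length by omega),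
      List.getElem_take, List.getElem_drop, Nat.add_comm]

theorem pvFoldlAppendStr (l : List String) :
    ∀ s : String, l.foldl (fun r t => r ++ t) s = s ++ String.join l := by
  induction l with
  | nil => intro s; simp [String.join]
  | cons x xs ih =>
    intro s
    show xs.foldl (fun r t => r ++ t) (s ++ x) = s ++ String.join (x :: xs)
    rw [ih (s ++ x)]
    have hx : String.join (x :: xs) = x ++ String.join xs := by
      show xs.foldl (fun r t => r ++ t) ("" ++ x) = _
      rw [ih ("" ++ x)]
      simp
    rw [hx, String.append_assoc]

theorem pvJoinNil : String.join ([] : List String) = "" := rfl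

theorem pvJoinCons (x : String) (l : List String) :
    String.join (x :: l) = x ++ String.join l := by
  show List.foldl (fun r t => r ++ t) ("" ++ x) l = _
  rw [pvFoldlAppendStr]
  simp

theorem pvJoinAppend (a b : List String) :
    String.join (a ++ b) = String.join a ++ String.join b := by
  induction a with
  | nil => simp [pvJoinNil]
  | cons x xs ih => simp [pvJoinCons, ih, String.append_assoc]

-- the stack invariant: pvGoB emits paperCut of every stacked sub-paper, in order
theorem pvGoB_join (m : Nat) : ∀ (st : List (List (List Int))), pvMeas st = m →
    ∀ (out : List String), pvGoB st out = String.join out ++ String.join (st.map paperCut) := by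
  induction m using Nat.strong_induction_on with
  | _ m IH =>
    intro st hm out
    match st with
    | [] => simp [pvGoB, String.join]
    | q :: rest =>
      rw [pvGoB]
      have hmeas : pvMeas (q :: rest) = 5 ^ q.length + pvMeas rest := pvMeas_cons q rest
      have hpos : 0 < 5 ^ q.length := Nat.pow_pos (by omega : (0:Nat) < 5)
      by_cases hs : (q.map List.sum).sum = 0
      · rw [dif_pos hs, IH (pvMeas rest) (by omega) rest rfl]
        have hq : paperCut q = "w" := by
          rw [paperCut, dif_pos (by rw [pvSumA_eq]; exact hs)]
        rw [pvJoinAppend]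
        simp [hq, pvJoinCons, pvJoinNil, String.append_assoc]
      · rw [dif_neg hs]
        by_cases hb : (q.map List.sum).sum = (q.length : Int) * (q.length : Int)
        · rw [if_pos hb, IH (pvMeas rest) (by omega) rest rfl]
          have hq : paperCut q = "b" := by
            rw [paperCut, dif_neg (by rw [pvSumA_eq]; exact hs),
              if_pos (by rw [pvSumA_eq, pow_two]; exact hb)]
          rw [pvJoinAppend]
          simp [hq, pvJoinCons, pvJoinNil, String.append_assoc]
        · rw [if_neg hb]
          have hn : 0 < q.length := pvSumMap_ne_zero_pos q hs
          set h := q.length / 2 with hdef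
          have hh : h ≤ q.length := Nat.div_le_self _ _
          have hh2 : h + h ≤ q.length := by omega
          -- the four stacked quadrants are A's p1..p4
          have e1 : (PySem.List.slice q none (some (h : Int))).map
              (fun r => PySem.List.slice r none (some (h : Int))) = (pvQuads q h).1 := by
            rw [pvQuads_eq, PySem.List.slice_to_natCast,
              pvRangeMapGetD q h hh (fun r => r.take h)]
            apply List.map_congr_left
            intro r _
            rw [PySem.List.slice_to_natCast]
          have e2 : (PySem.List.slice q none (some (h : Int))).map
              (fun r => PySem.List.slice r (some (h : Int)) none) = (pvQuads q h).2.1 := by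
            rw [pvQuads_eq, PySem.List.slice_to_natCast,
              pvRangeMapGetD q h hh (fun r => r.drop h)]
            apply List.map_congr_left
            intro r _
            rw [PySem.List.slice_from_natCast]
          have e3 : (PySem.List.slice q (some (h : Int)) (some ((h : Int) + (h : Int)))).map
              (fun r => PySem.List.slice r none (some (h : Int))) = (pvQuads q h).2.2.1 := by
            rw [pvQuads_eq, PySem.List.slice_natCast_add,
              pvRangeMapGetD' q h hh2 (fun r => r.take h)]
            apply List.map_congr_left
            intro r _
            rw [PySem.List.slice_to_natCast]
          have e4 : (PySem.List.slice q (some (h : Int)) (some ((h : Int) + (h : Int)))).map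
              (fun r => PySem.List.slice r (some (h : Int)) none) = (pvQuads q h).2.2.2 := by
            rw [pvQuads_eq, PySem.List.slice_natCast_add,
              pvRangeMapGetD' q h hh2 (fun r => r.drop h)]
            apply List.map_congr_left
            intro r _
            rw [PySem.List.slice_from_natCast]
          have hmq : ∀ x ∈ [(pvQuads q h).1, (pvQuads q h).2.1, (pvQuads q h).2.2.1,
              (pvQuads q h).2.2.2], x.length = h := by
            intro x hx
            simp only [List.mem_cons, List.not_mem_nil, or_false] at hx
            rcases hx with rfl | rfl | rfl | rfl
            · exact pvQuads_len1 q h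
            · exact pvQuads_len2 q h
            · exact pvQuads_len3 q h
            · exact pvQuads_len4 q h
          rw [e1, e2, e3, e4]
          have hm' : pvMeas ((pvQuads q h).1 :: (pvQuads q h).2.1 :: (pvQuads q h).2.2.1 ::
              (pvQuads q h).2.2.2 :: rest) < m := by
            rw [pvMeas_cons, pvMeas_cons, pvMeas_cons, pvMeas_cons,
              hmq _ (by simp), hmq _ (by simp), hmq _ (by simp), hmq _ (by simp)]
            have hle : h ≤ q.length - 1 := by omega
            have hp : (5:Nat) ^ h ≤ 5 ^ (q.length - 1) := Nat.pow_le_pow_right (by omega) hle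
            have h5 : 4 * 5 ^ (q.length - 1) < 5 ^ q.length := by
              have he : 5 ^ q.length = 5 * 5 ^ (q.length - 1) := by
                rw [← pow_succ']
                congr 1
                omega
              have : 0 < (5:Nat) ^ (q.length - 1) := Nat.pow_pos (by omega : (0:Nat) < 5)
              omega
            omega
          rw [IH _ (by omega) _ rfl]
          have hq : paperCut q = paperCut (pvQuads q h).1 ++ paperCut (pvQuads q h).2.1 ++
              paperCut (pvQuads q h).2.2.1 ++ paperCut (pvQuads q h).2.2.2 := by
            rw [paperCut, dif_neg (by rw [pvSumA_eq]; exact hs),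
              if_neg (by rw [pvSumA_eq, pow_two]; exact hb)]
          simp [hq, pvJoinCons, String.append_assoc]

-- ===== VERDICT (by name: the statement is the Claim_ definition above) =====
theorem paperCut_spec : Claim_equal_paperCut := by
  intro p _
  unfold Spec_paperCut paperCut_alt
  rw [pvGoB_join (pvMeas [p]) [p] rfl []]
  simp [pvJoinCons, pvJoinNil]
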